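-- pv_equiv track=rewrite | github.com/hahmad2205/Playground | weatherMan.py | calculate_max_humid_year
-- ===== SOURCE A (Python) =====
-- def calculate_max_humid_year(weather_record, date_abbr, max_humid, max_humid_date):
--     for weather_line in weather_record:
--         max_humidity_value = weather_line.get("Max Humidity")
--
--         if max_humidity_value:
--             current_humid = int(max_humidity_value)
--             max_humid = max(current_humid, max_humid)
--             max_humid_date = weather_line[date_abbr] if current_humid == int(max_humid) else max_humid_date
--     return max_humid, max_humid_date
-- ===== SOURCE B (Python) =====
-- def calculate_max_humid_year(weather_record, date_abbr, max_humid, max_humid_date):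
--     # pass 1: overall maximum over the seed and every truthy "Max Humidity" value
--     vals = [int(w["Max Humidity"]) for w in weather_record if w.get("Max Humidity")]
--     best = max([max_humid] + vals)
--     # pass 2: the date of the LAST record whose humidity equals that maximum
--     for w in reversed(weather_record):
--         v = w.get("Max Humidity")
--         if v and int(v) == best:
--             return best, w[date_abbr]
--     return best, max_humid_date
-- ===== Notes on version B (the rewrite author's own statement) =====
-- stated objective: alternative
-- what changed: Replaces A's single running-max loop that updates the date on the fly by a two-phase decomposition: first compute the overall maximum over the seed and all truthy humidity values, then scan the records backwards and return the date of the first (i.e. last) record attaining that maximum, defaulting to the given date.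
-- outside the precondition, e.g. on calculate_max_humid_year([{'Max Humidity': '5'}], 'PKT', 9, 'd'): A returns (9, 'd'), B returns (9, 'd')
import Mathlib
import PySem

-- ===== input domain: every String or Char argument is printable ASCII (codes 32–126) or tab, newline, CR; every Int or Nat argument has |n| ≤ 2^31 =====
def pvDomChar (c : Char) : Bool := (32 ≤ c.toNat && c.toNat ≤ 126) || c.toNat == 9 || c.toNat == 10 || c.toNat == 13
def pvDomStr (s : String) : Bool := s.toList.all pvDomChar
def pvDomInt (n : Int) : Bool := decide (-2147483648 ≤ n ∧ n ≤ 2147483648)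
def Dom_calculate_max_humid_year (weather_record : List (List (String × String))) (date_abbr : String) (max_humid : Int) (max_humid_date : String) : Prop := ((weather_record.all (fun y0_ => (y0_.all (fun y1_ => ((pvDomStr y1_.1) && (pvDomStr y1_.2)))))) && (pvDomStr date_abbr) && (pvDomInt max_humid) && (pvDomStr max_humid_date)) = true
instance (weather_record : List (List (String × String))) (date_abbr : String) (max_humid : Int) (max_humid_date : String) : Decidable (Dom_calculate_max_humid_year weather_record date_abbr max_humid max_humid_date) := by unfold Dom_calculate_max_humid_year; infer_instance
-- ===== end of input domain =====

-- B replaces A's single combined running-max loop by a max-then-locate decomposition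
-- (compute the overall maximum, then scan backwards for the last record attaining it);
-- objective: alternative decomposition, same return value.

-- ===== PORT A =====
-- one loop step of A: dicts are association lists, .get = first match (List.lookup)
def pvStepA (date_abbr : String) (st : Int × String) (weather_line : List (String × String)) : Int × String :=
  match List.lookup "Max Humidity" weather_line with
  | none => st                      -- .get returned None (falsy)
  | some v =>
    if v ≠ "" then                  -- Python truthiness of a string
      match PySem.Int.ofStr? v with
      | none => st                  -- int(v) raises ValueError here; excluded by Pre_
      | some current_humid =>
        let m := max current_humid st.1
        (m, if current_humid = m then (List.lookup date_abbr weather_line).getD st.2 else st.2)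
        -- weather_line[date_abbr]: KeyError (lookup = none) excluded by Pre_; getD is never the default inside Pre_
    else st

def calculate_max_humid_year (weather_record : List (List (String × String))) (date_abbr : String) (max_humid : Int) (max_humid_date : String) : Int × String :=
  weather_record.foldl (pvStepA date_abbr) (max_humid, max_humid_date)

-- ===== PORT B =====
-- the parsed humidity of a record, none when falsy/unparsable (the comprehension's filter + int)
def pvVal (weather_line : List (String × String)) : Option Int :=
  match List.lookup "Max Humidity" weather_line with
  | some v => if v ≠ "" then PySem.Int.ofStr? v else none
  | none => none

-- the backwards scan of Source B (early return on the first match in the reversed list)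
def pvFind (best : Int) (date_abbr : String) : List (List (String × String)) → Option String
  | [] => none
  | w :: rest =>
    if pvVal w = some best then List.lookup date_abbr w   -- w[date_abbr]; none = KeyError, excluded by Pre_
    else pvFind best date_abbr rest

def calculate_max_humid_year_alt (weather_record : List (List (String × String))) (date_abbr : String) (max_humid : Int) (max_humid_date : String) : Int × String :=
  let vals := weather_record.filterMap pvVal
  let best := vals.foldl max max_humid          -- max([max_humid] + vals)
  (best, (pvFind best date_abbr weather_record.reverse).getD max_humid_date)

-- ===== PRECONDITION & SPEC =====
-- Pre_ excludes the inputs on which A raises: a truthy "Max Humidity" value int() cannot parse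
-- (ValueError), and a record with a truthy humidity but no date_abbr key (KeyError when it wins the
-- running max; slight narrowing: we require the date key on EVERY truthy-humidity record, also on
-- records that never win the max, where A would return).
def pvPreLine (date_abbr : String) (weather_line : List (String × String)) : Bool :=
  match List.lookup "Max Humidity" weather_line with
  | none => true
  | some v => v == "" || ((PySem.Int.ofStr? v).isSome && (List.lookup date_abbr weather_line).isSome)

def Pre_calculate_max_humid_year (weather_record : List (List (String × String))) (date_abbr : String) (max_humid : Int) (max_humid_date : String) : Prop :=
  weather_record.all (pvPreLine date_abbr) = true

instance (weather_record : List (List (String × String))) (date_abbr : String) (max_humid : Int) (max_humid_date : String) : Decidable (Pre_calculate_max_humid_year weather_record date_abbr max_humid max_humid_date) := by unfold Pre_calculate_max_humid_year; infer_instance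

def pvWitness_calculate_max_humid_year : (List (List (String × String))) × String × Int × String :=
  ([[("Max Humidity", "5"), ("PKT", "2004-1-1")], [("Max Humidity", "7"), ("PKT", "2004-1-2")]], "PKT", 0, "")

def Spec_calculate_max_humid_year (weather_record : List (List (String × String))) (date_abbr : String) (max_humid : Int) (max_humid_date : String) (out : Int × String) : Prop := out = calculate_max_humid_year_alt weather_record date_abbr max_humid max_humid_date
instance (weather_record : List (List (String × String))) (date_abbr : String) (max_humid : Int) (max_humid_date : String) (out : Int × String) : Decidable (Spec_calculate_max_humid_year weather_record date_abbr max_humid max_humid_date out) := by unfold Spec_calculate_max_humid_year; infer_instance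

-- ===== CLAIM (what is proved, stated in full; the proofs are below) =====
def Claim_equal_calculate_max_humid_year : Prop := ∀ (weather_record : List (List (String × String))) (date_abbr : String) (max_humid : Int) (max_humid_date : String), Dom_calculate_max_humid_year weather_record date_abbr max_humid max_humid_date → Pre_calculate_max_humid_year weather_record date_abbr max_humid max_humid_date → Spec_calculate_max_humid_year weather_record date_abbr max_humid max_humid_date (calculate_max_humid_year weather_record date_abbr max_humid max_humid_date)

-- ===== LEMMAS AND PROOFS =====

-- under the per-record precondition, a record that attains a value has the date key
theorem pvVal_some_date (da : String) (w : List (String × String)) (b : Int)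
    (hpre : pvPreLine da w = true) (h : pvVal w = some b) :
    (List.lookup da w).isSome = true := by
  unfold pvVal at h
  unfold pvPreLine at hpre
  cases hmh : List.lookup "Max Humidity" w with
  | none => rw [hmh] at h; simp at h
  | some v =>
    rw [hmh] at h hpre
    by_cases hv : v = ""
    · simp [hv] at h
    · simp only [hv, beq_iff_eq, Bool.or_eq_true, Bool.and_eq_true] at hpre
      rcases hpre with h1 | h2
      · exact h1.elim
      · exact h2.2

-- a running max not attained by any element equals its seed
theorem foldl_max_stuck (vs : List Int) : ∀ s : Int, (∀ x ∈ vs, x ≠ vs.foldl max s) → vs.foldl max s = s := by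
  induction vs with
  | nil => intro s _; rfl
  | cons c t ih =>
    intro s h
    have hV : t.foldl max (max s c) = max s c := by
      apply ih
      intro x hx
      exact h x (List.mem_cons_of_mem _ hx)
    have hc : c ≠ (c :: t).foldl max s := h c (List.mem_cons_self)
    simp only [List.foldl_cons] at hc ⊢
    rcases max_choice s c with hm | hm
    · rw [hV, hm]
    · exfalso; exact hc (by rw [hV, hm])

-- splitting the backwards scan (needs the precondition: a match always yields a date)
theorem pvFind_append (best : Int) (da : String) (xs ys : List (List (String × String)))
    (hpre : xs.all (pvPreLine da) = true) :
    pvFind best da (xs ++ ys) = (pvFind best da xs).orElse (fun _ => pvFind best da ys) := by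
  induction xs with
  | nil => simp [pvFind]
  | cons w rest ih =>
    simp only [List.all_cons, Bool.and_eq_true] at hpre
    simp only [List.cons_append, pvFind]
    by_cases h : pvVal w = some best
    · obtain ⟨dt, hdt⟩ := Option.isSome_iff_exists.mp (pvVal_some_date da w best hpre.1 h)
      simp [h, hdt, Option.orElse]
    · simp [h, ih hpre.2]

-- under the precondition, an unsuccessful backwards scan really means: no record attains best
theorem pvFind_none (best : Int) (da : String) (xs : List (List (String × String))) :
    xs.all (pvPreLine da) = true → pvFind best da xs = none →
    ∀ w ∈ xs, pvVal w ≠ some best := by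
  induction xs with
  | nil => intro _ _ w hw; cases hw
  | cons w rest ih =>
    intro hpre hnone x hx
    simp only [List.all_cons, Bool.and_eq_true] at hpre
    simp only [pvFind] at hnone
    by_cases h : pvVal w = some best
    · exfalso
      rw [if_pos h] at hnone
      have hd := pvVal_some_date da w best hpre.1 h
      rw [hnone] at hd; exact absurd hd (by simp)
    · rw [if_neg h] at hnone
      rcases List.mem_cons.mp hx with rfl | hx'
      · exact h
      · exact ih hpre.2 hnone x hx'

-- main invariant: A's fold from any state equals B's max-then-locate answer from that state
theorem main_inv (da : String) (ws : List (List (String × String))) :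
    ∀ (m : Int) (d : String), ws.all (pvPreLine da) = true →
    ws.foldl (pvStepA da) (m, d) =
      ((ws.filterMap pvVal).foldl max m,
       (pvFind ((ws.filterMap pvVal).foldl max m) da ws.reverse).getD d) := by
  induction ws with
  | nil => intro m d _; simp [pvFind]
  | cons w rest ih =>
    intro m d hpre
    simp only [List.all_cons, Bool.and_eq_true] at hpre
    have hrevpre : rest.reverse.all (pvPreLine da) = true := by
      rw [List.all_reverse]; exact hpre.2
    simp only [List.foldl_cons, List.reverse_cons]
    cases hmh : List.lookup "Max Humidity" w with
    | none =>
      have hv0 : pvVal w = none := by unfold pvVal; rw [hmh]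
      have hstep : pvStepA da (m, d) w = (m, d) := by unfold pvStepA; rw [hmh]
      rw [hstep, ih m d hpre.2]
      have hfil : (w :: rest).filterMap pvVal = rest.filterMap pvVal := by
        simp [hv0]
      rw [hfil, pvFind_append _ _ _ _ hrevpre]
      simp [pvFind, hv0]
    | some v =>
      by_cases hv : v = ""
      · have hv0 : pvVal w = none := by unfold pvVal; rw [hmh]; simp [hv]
        have hstep : pvStepA da (m, d) w = (m, d) := by unfold pvStepA; rw [hmh]; simp [hv]
        rw [hstep, ih m d hpre.2]
        have hfil : (w :: rest).filterMap pvVal = rest.filterMap pvVal := by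
          simp [hv0]
        rw [hfil, pvFind_append _ _ _ _ hrevpre]
        simp [pvFind, hv0]
      · -- truthy value: the precondition supplies a parsed int and the date key
        have hpl := hpre.1
        unfold pvPreLine at hpl
        rw [hmh] at hpl
        simp only [hv, beq_iff_eq, Bool.or_eq_true, Bool.and_eq_true] at hpl
        rcases hpl with h1 | h2
        · exact h1.elim
        obtain ⟨hparse, hdate⟩ := h2
        obtain ⟨c, hc⟩ := Option.isSome_iff_exists.mp hparse
        obtain ⟨dt, hdt⟩ := Option.isSome_iff_exists.mp hdate
        have hvw : pvVal w = some c := by unfold pvVal; rw [hmh]; simp [hv, hc]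
        have hstep : pvStepA da (m, d) w = (max c m, if c = max c m then dt else d) := by
          unfold pvStepA; rw [hmh]; simp [hv, hc, hdt]
        rw [hstep, ih _ _ hpre.2]
        have hfil : (w :: rest).filterMap pvVal = c :: rest.filterMap pvVal := by
          simp [hvw]
        rw [hfil]
        simp only [List.foldl_cons]
        rw [max_comm m c]
        rw [pvFind_append _ _ _ _ hrevpre]
        cases hfind : pvFind ((rest.filterMap pvVal).foldl max (max c m)) da rest.reverse with
        | some r => simp [Option.orElse]
        | none =>
          simp only [Option.orElse, Option.getD]
          have hnoatt : ∀ x ∈ rest.filterMap pvVal,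
              x ≠ (rest.filterMap pvVal).foldl max (max c m) := by
            intro x hx
            obtain ⟨w', hw', hvx⟩ := List.mem_filterMap.mp hx
            intro hxe
            exact pvFind_none _ da rest.reverse hrevpre
              hfind w' (List.mem_reverse.mpr hw') (hxe ▸ hvx)
          have hVstuck := foldl_max_stuck (rest.filterMap pvVal) (max c m) hnoatt
          simp only [pvFind, hvw, hdt]
          rw [hVstuck]
          by_cases hcm : c = max c m
          · rw [if_pos hcm, if_pos (congrArg some hcm)]
          · rw [if_neg hcm, if_neg (fun h => hcm (Option.some_inj.mp h))]

-- ===== VERDICT (by name: the statement is the Claim_ definition above) =====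
theorem calculate_max_humid_year_spec : Claim_equal_calculate_max_humid_year := by
  intro weather_record date_abbr max_humid max_humid_date _ hpre
  unfold Spec_calculate_max_humid_year calculate_max_humid_year calculate_max_humid_year_alt
  exact main_inv date_abbr weather_record max_humid max_humid_date hpre
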